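-- pv_equiv track=rewrite | github.com/Noor-Nasri/daily-leetcode | 1851-maximum-number-of-events-that-can-be-attended-ii/maximum-number-of-events-that-can-be-attended-ii.py | buildNextEvents
-- ===== SOURCE A (Python) =====
-- from heapq import heappop, heappush
--
-- def buildNextEvents(events):
--     nextEvents = [len(events) for i in range(len(events))]
--     unsolved = []
--     for ind in range(len(events)):
--         st, en, v = events[ind]
--
--         while unsolved and unsolved[0][0] < st:
--             prevEd, prevInd = heappop(unsolved)
--             nextEvents[prevInd] = ind
--
--         heappush(unsolved, (en, ind))
--
--     return nextEvents
-- ===== SOURCE B (Python) =====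
-- def buildNextEvents(events):
--     n = len(events)
--     nextEvents = [n] * n
--     for i in range(n):
--         st, en, v = events[i]
--         for j in range(i + 1, n):
--             if events[j][0] > en:
--                 nextEvents[i] = j
--                 break
--     return nextEvents
-- ===== Notes on version B (the rewrite author's own statement) =====
-- stated objective: simpler
-- what changed: Replaces the heap of unsolved events with a direct per-index forward scan for the first later event whose start exceeds this event's end.
import Mathlib
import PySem

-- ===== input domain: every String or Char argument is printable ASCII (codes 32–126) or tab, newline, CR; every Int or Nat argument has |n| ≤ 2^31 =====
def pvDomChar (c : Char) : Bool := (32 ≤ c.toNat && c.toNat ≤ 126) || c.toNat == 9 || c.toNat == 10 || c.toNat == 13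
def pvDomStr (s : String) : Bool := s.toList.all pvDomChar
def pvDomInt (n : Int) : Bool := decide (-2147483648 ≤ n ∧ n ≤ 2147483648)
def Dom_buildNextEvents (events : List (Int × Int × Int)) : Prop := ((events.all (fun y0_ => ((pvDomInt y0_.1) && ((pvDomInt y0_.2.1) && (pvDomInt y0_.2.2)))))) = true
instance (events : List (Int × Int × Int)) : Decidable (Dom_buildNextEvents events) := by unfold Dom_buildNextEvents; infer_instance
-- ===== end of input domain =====

-- B replaces A's heap of unsolved events with a direct per-index forward scan (simpler); return value only.

-- ===== PORT A =====
-- The Python heapq heap of (end, ind) int pairs is modeled by a list kept sorted in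
-- lexicographic order: heappush = ordered insert, heappop = take the head.  This is
-- exact for heapq's observable pop order on int pairs.
def pvHeapLt (x y : Int × Nat) : Bool := x.1 < y.1 || (x.1 == y.1 && x.2 < y.2)

def pvHeapPush (uns : List (Int × Nat)) (x : Int × Nat) : List (Int × Nat) :=
  match uns with
  | [] => [x]
  | y :: rest => if pvHeapLt x y then x :: y :: rest else y :: pvHeapPush rest x

-- the inner `while unsolved and unsolved[0][0] < st` loop: pop and set nextEvents[prevInd] = ind
def pvPopLoop (next : List Int) (uns : List (Int × Nat)) (st : Int) (ind : Nat) :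
    List Int × List (Int × Nat) :=
  match uns with
  | [] => (next, [])
  | (prevEd, prevInd) :: rest =>
    if prevEd < st then pvPopLoop (next.set prevInd (Int.ofNat ind)) rest st ind
    else (next, (prevEd, prevInd) :: rest)

-- one iteration of `for ind in range(len(events))`; events[ind] is always in range, so getD is exact
def pvStep (events : List (Int × Int × Int)) (state : List Int × List (Int × Nat)) (ind : Nat) :
    List Int × List (Int × Nat) :=
  let ev := events.getD ind (0, 0, 0)       -- st, en, v = events[ind]
  let popped := pvPopLoop state.1 state.2 ev.1 ind
  (popped.1, pvHeapPush popped.2 (ev.2.1, ind))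

def buildNextEvents (events : List (Int × Int × Int)) : List Int :=
  ((List.range events.length).foldl (pvStep events)
    (List.replicate events.length (Int.ofNat events.length), [])).1

-- ===== PORT B =====
-- inner `for j in range(i+1, n): if events[j][0] > en: ... break`
def pvScan (events : List (Int × Int × Int)) (en : Int) (js : List Nat) : Option Nat :=
  match js with
  | [] => none
  | j :: rest => if en < (events.getD j (0, 0, 0)).1 then some j else pvScan events en rest

def buildNextEvents_alt (events : List (Int × Int × Int)) : List Int :=
  let n := events.length
  (List.range n).map (fun i =>
    let ev := events.getD i (0, 0, 0)
    match pvScan events ev.2.1 (List.range' (i + 1) (n - (i + 1))) with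
    | some j => Int.ofNat j
    | none => Int.ofNat n)

-- ===== PRECONDITION & SPEC =====
def Spec_buildNextEvents (events : List (Int × Int × Int)) (out : List Int) : Prop := out = buildNextEvents_alt events
instance (events : List (Int × Int × Int)) (out : List Int) : Decidable (Spec_buildNextEvents events out) := by unfold Spec_buildNextEvents; infer_instance

-- ===== CLAIM (what is proved, stated in full; the proofs are below) =====
def Claim_equal_buildNextEvents : Prop := ∀ (events : List (Int × Int × Int)), Dom_buildNextEvents events → Spec_buildNextEvents events (buildNextEvents events)

-- ===== LEMMAS AND PROOFS =====

def endOf (events : List (Int × Int × Int)) (i : Nat) : Int := (events.getD i (0,0,0)).2.1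
def startOf (events : List (Int × Int × Int)) (j : Nat) : Int := (events.getD j (0,0,0)).1

-- value B assigns to index i when only events with index < k are considered
def valAt (events : List (Int × Int × Int)) (k i : Nat) : Int :=
  match pvScan events (endOf events i) (List.range' (i + 1) (k - (i + 1))) with
  | some j => Int.ofNat j
  | none => Int.ofNat events.length

-- loop invariant for A's fold after processing indices < k
def pvInv (events : List (Int × Int × Int)) (k : Nat) (s : List Int × List (Int × Nat)) : Prop :=
  s.1.length = events.length ∧
  (∀ i, s.1.getD i (Int.ofNat events.length) = valAt events k i) ∧
  s.2.Pairwise (fun a b => a.1 ≤ b.1) ∧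
  (s.2.map Prod.snd).Nodup ∧
  (∀ e i, (e, i) ∈ s.2 ↔ i < k ∧ e = endOf events i ∧
      pvScan events (endOf events i) (List.range' (i + 1) (k - (i + 1))) = none)

theorem pvScan_append (events : List (Int × Int × Int)) (en : Int) (l l' : List Nat) :
    pvScan events en (l ++ l') =
      match pvScan events en l with
      | some j => some j
      | none => pvScan events en l' := by
  induction l with
  | nil => simp [pvScan]
  | cons j rest ih =>
    simp only [List.cons_append, pvScan, ih]
    by_cases h : en < (events.getD j (0,0,0)).1
    · rw [if_pos h, if_pos h]
    · rw [if_neg h, if_neg h]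

theorem valAt_succ_lt (events : List (Int × Int × Int)) (k i : Nat) (h : i < k) :
    valAt events (k + 1) i =
      match pvScan events (endOf events i) (List.range' (i + 1) (k - (i + 1))) with
      | some j => Int.ofNat j
      | none => if endOf events i < startOf events k then Int.ofNat k
                else Int.ofNat events.length := by
  have hr : List.range' (i + 1) (k + 1 - (i + 1)) =
      List.range' (i + 1) (k - (i + 1)) ++ [k] := by
    have h1 : k + 1 - (i + 1) = (k - (i + 1)) + 1 := by omega
    rw [h1, List.range'_1_concat]
    congr 2
    omega
  unfold valAt
  rw [hr, pvScan_append]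
  cases hs : pvScan events (endOf events i) (List.range' (i + 1) (k - (i + 1))) with
  | some j => simp
  | none =>
    simp only [pvScan]
    unfold startOf
    by_cases hlt : endOf events i < (events.getD k (0,0,0)).1
    · rw [if_pos hlt, if_pos hlt]
    · rw [if_neg hlt, if_neg hlt]

theorem valAt_succ_ge (events : List (Int × Int × Int)) (k i : Nat) (h : k ≤ i) :
    valAt events (k + 1) i = valAt events k i := by
  unfold valAt
  have h1 : k + 1 - (i + 1) = 0 := by omega
  have h2 : k - (i + 1) = 0 := by omega
  rw [h1, h2]

theorem pvHeapPush_perm (uns : List (Int × Nat)) (x : Int × Nat) :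
    (pvHeapPush uns x).Perm (x :: uns) := by
  induction uns with
  | nil => simp [pvHeapPush]
  | cons y rest ih =>
    by_cases h : pvHeapLt x y
    · simp [pvHeapPush, h]
    · simp only [pvHeapPush, h, if_neg]
      exact ((ih.cons y).trans (List.Perm.swap x y rest))

theorem mem_pvHeapPush (uns : List (Int × Nat)) (x z : Int × Nat) :
    z ∈ pvHeapPush uns x ↔ z = x ∨ z ∈ uns := by
  rw [(pvHeapPush_perm uns x).mem_iff]
  simp

theorem pvHeapPush_pairwise (uns : List (Int × Nat)) (x : Int × Nat)
    (h : uns.Pairwise (fun a b => a.1 ≤ b.1)) :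
    (pvHeapPush uns x).Pairwise (fun a b => a.1 ≤ b.1) := by
  induction uns with
  | nil => simp [pvHeapPush]
  | cons y rest ih =>
    rcases List.pairwise_cons.mp h with ⟨hy, hrest⟩
    by_cases hlt : pvHeapLt x y
    · have hx1 : x.1 ≤ y.1 := by
        rcases Bool.or_eq_true_iff.mp hlt with h1 | h2
        · exact le_of_lt (by exact_mod_cast of_decide_eq_true h1)
        · exact le_of_eq (by exact_mod_cast (eq_of_beq (Bool.and_eq_true_iff.mp h2).1))
      simp only [pvHeapPush, hlt, if_pos]
      refine List.pairwise_cons.mpr ⟨?_, h⟩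
      intro z hz
      rcases List.mem_cons.mp hz with hz | hz
      · exact hz ▸ hx1
      · exact le_trans hx1 (hy z hz)
    · have hy1 : y.1 ≤ x.1 := by
        by_contra hc
        push_neg at hc
        exact hlt (Bool.or_eq_true_iff.mpr (Or.inl (decide_eq_true hc)))
      simp only [pvHeapPush, hlt, if_neg, not_false_iff]
      refine List.pairwise_cons.mpr ⟨?_, ih hrest⟩
      intro z hz
      rcases (mem_pvHeapPush rest x z).mp hz with hz | hz
      · exact hz ▸ hy1
      · exact hy z hz

theorem getD_set (l : List Int) (p : Nat) (v : Int) (i : Nat) (d : Int) :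
    (l.set p v).getD i d = if p = i ∧ p < l.length then v else l.getD i d := by
  rw [List.getD_eq_getElem?_getD, List.getD_eq_getElem?_getD, List.getElem?_set]
  by_cases h1 : p = i
  · subst h1
    by_cases h2 : p < l.length <;> simp [h2]
  · simp [h1]

-- the big pop lemma
theorem pvPopLoop_spec (events : List (Int × Int × Int)) (k : Nat) (hk : k < events.length) :
    ∀ (uns : List (Int × Nat)) (next : List Int),
    next.length = events.length →
    uns.Pairwise (fun a b => a.1 ≤ b.1) →
    (uns.map Prod.snd).Nodup →
    (∀ e i, (e, i) ∈ uns → i < k ∧ e = endOf events i ∧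
        pvScan events (endOf events i) (List.range' (i + 1) (k - (i + 1))) = none) →
    (∀ i, next.getD i (Int.ofNat events.length) =
        if (endOf events i, i) ∈ uns ∧ endOf events i < startOf events k
        then valAt events k i else valAt events (k + 1) i) →
    (pvPopLoop next uns (startOf events k) k).1.length = events.length ∧
    (∀ i, (pvPopLoop next uns (startOf events k) k).1.getD i (Int.ofNat events.length)
        = valAt events (k + 1) i) ∧
    (pvPopLoop next uns (startOf events k) k).2.Pairwise (fun a b => a.1 ≤ b.1) ∧
    ((pvPopLoop next uns (startOf events k) k).2.map Prod.snd).Nodup ∧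
    (∀ x, x ∈ (pvPopLoop next uns (startOf events k) k).2 ↔
        x ∈ uns ∧ ¬ x.1 < startOf events k) := by
  intro uns
  induction uns with
  | nil =>
    intro next hlen _ _ _ hval
    refine ⟨hlen, ?_, by simp [pvPopLoop], by simp [pvPopLoop], by simp [pvPopLoop]⟩
    intro i
    have := hval i
    simpa [pvPopLoop] using this
  | cons hd rest ih =>
    intro next hlen hsort hnodup h1 hval
    obtain ⟨e, i0⟩ := hd
    rcases List.pairwise_cons.mp hsort with ⟨hhd, hsrest⟩
    rcases h1 e i0 (List.mem_cons_self) with ⟨hi0k, he, hscan0⟩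
    by_cases hpop : e < startOf events k
    · -- head is popped
      have hnd := hnodup
      simp only [List.map_cons, List.nodup_cons] at hnd
      have hi0notin : i0 ∉ rest.map Prod.snd := hnd.1
      have hvset : ∀ i, (next.set i0 (Int.ofNat k)).getD i (Int.ofNat events.length) =
          if (endOf events i, i) ∈ rest ∧ endOf events i < startOf events k
          then valAt events k i else valAt events (k + 1) i := by
        intro i
        rw [getD_set]
        by_cases hii : i0 = i
        · subst hii
          have hlt0 : i0 < next.length := by omega
          rw [if_pos ⟨rfl, hlt0⟩]
          have hnotin : (endOf events i0, i0) ∉ rest := by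
            intro hc
            exact hi0notin (List.mem_map.mpr ⟨_, hc, rfl⟩)
          rw [if_neg (by intro hc; exact hnotin hc.1)]
          rw [valAt_succ_lt events k i0 hi0k, hscan0]
          subst he
          simp [hpop]
        · rw [if_neg (by intro hc; exact hii hc.1)]
          rw [hval i]
          have hmemiff : ((endOf events i, i) ∈ (e, i0) :: rest) ↔ ((endOf events i, i) ∈ rest) := by
            simp only [List.mem_cons, Prod.mk.injEq]
            constructor
            · rintro (⟨-, h2⟩ | hmm)
              · exact absurd h2 (fun hq => hii hq.symm)
              · exact hmm
            · exact Or.inr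
          by_cases hcc : (endOf events i, i) ∈ rest ∧ endOf events i < startOf events k
          · rw [if_pos ⟨hmemiff.mpr hcc.1, hcc.2⟩, if_pos hcc]
          · rw [if_neg (fun hc => hcc ⟨hmemiff.mp hc.1, hc.2⟩), if_neg hcc]
      have hrec := ih (next.set i0 (Int.ofNat k))
        (by simpa using hlen) hsrest hnd.2
        (fun e' i hmem => h1 e' i (List.mem_cons_of_mem _ hmem)) hvset
      have hred : pvPopLoop next ((e, i0) :: rest) (startOf events k) k
          = pvPopLoop (next.set i0 (Int.ofNat k)) rest (startOf events k) k := by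
        simp [pvPopLoop, hpop]
      rw [hred]
      refine ⟨hrec.1, hrec.2.1, hrec.2.2.1, hrec.2.2.2.1, ?_⟩
      intro x
      rw [hrec.2.2.2.2 x]
      constructor
      · rintro ⟨hx, hx2⟩; exact ⟨List.mem_cons_of_mem _ hx, hx2⟩
      · rintro ⟨hx, hx2⟩
        rcases List.mem_cons.mp hx with hx | hx
        · exact absurd (by rw [hx]; exact hpop) hx2
        · exact ⟨hx, hx2⟩
    · -- head stays: loop stops
      have hstop : pvPopLoop next ((e, i0) :: rest) (startOf events k) k
          = (next, (e, i0) :: rest) := by simp [pvPopLoop, hpop]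
      rw [hstop]
      have hcondfalse : ∀ i, ¬ ((endOf events i, i) ∈ (e, i0) :: rest ∧
          endOf events i < startOf events k) := by
        rintro i ⟨hmem, hlt⟩
        rcases List.mem_cons.mp hmem with hc | hc
        · have : endOf events i = e := congrArg Prod.fst hc
          exact hpop (this ▸ hlt)
        · have : e ≤ endOf events i := hhd _ hc
          exact hpop (lt_of_le_of_lt this hlt)
      refine ⟨hlen, ?_, hsort, hnodup, ?_⟩
      · intro i
        rw [hval i, if_neg (hcondfalse i)]
      · intro x
        constructor
        · intro hx
          refine ⟨hx, ?_⟩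
          rcases List.mem_cons.mp hx with hc | hc
          · exact hc ▸ hpop
          · exact fun hlt => hpop (lt_of_le_of_lt (hhd _ hc) hlt)
        · exact fun h => h.1

theorem pvStep_inv (events : List (Int × Int × Int)) (k : Nat) (hk : k < events.length)
    (s : List Int × List (Int × Nat)) (h : pvInv events k s) :
    pvInv events (k + 1) (pvStep events s k) := by
  rcases h with ⟨hlen, hval, hsort, hnodup, hmem⟩
  have hst : (events.getD k (0,0,0)).1 = startOf events k := rfl
  have hen : (events.getD k (0,0,0)).2.1 = endOf events k := rfl
  have hvset : ∀ i, s.1.getD i (Int.ofNat events.length) =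
      if (endOf events i, i) ∈ s.2 ∧ endOf events i < startOf events k
      then valAt events k i else valAt events (k + 1) i := by
    intro i
    rw [hval i]
    by_cases hc : (endOf events i, i) ∈ s.2 ∧ endOf events i < startOf events k
    · rw [if_pos hc]
    · rw [if_neg hc]
      by_cases hik : i < k
      · rw [valAt_succ_lt events k i hik]
        cases hs : pvScan events (endOf events i) (List.range' (i + 1) (k - (i + 1))) with
        | some j => simp [valAt, hs]
        | none =>
          have hin : (endOf events i, i) ∈ s.2 := (hmem _ _).mpr ⟨hik, rfl, hs⟩
          have hnl : ¬ endOf events i < startOf events k := fun hlt => hc ⟨hin, hlt⟩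
          rw [if_neg hnl]
          simp [valAt, hs]
      · rw [valAt_succ_ge events k i (by omega)]
  have hpop := pvPopLoop_spec events k hk s.2 s.1 hlen hsort hnodup
    (fun e i hm => ((hmem e i).mp hm)) hvset
  rcases hpop with ⟨plen, pval, psort, pnodup, pmem⟩
  have hknotin : ∀ e', (e', k) ∉ (pvPopLoop s.1 s.2 (startOf events k) k).2 := by
    intro e' hc
    have := ((hmem e' k).mp ((pmem _).mp hc).1).1
    omega
  refine ⟨?_, ?_, ?_, ?_, ?_⟩
  · simpa [pvStep, hst] using plen
  · intro i
    simpa [pvStep, hst] using pval i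
  · simp only [pvStep, hst, hen]
    exact pvHeapPush_pairwise _ _ psort
  · simp only [pvStep, hst, hen]
    rw [List.Perm.nodup_iff (List.Perm.map Prod.snd (pvHeapPush_perm _ _))]
    simp only [List.map_cons, List.nodup_cons]
    refine ⟨?_, pnodup⟩
    intro hc
    rcases List.mem_map.mp hc with ⟨⟨e', i'⟩, hmem', heq⟩
    have heq' : i' = k := heq
    subst heq'
    exact hknotin e' hmem'
  · intro e i
    simp only [pvStep, hst, hen]
    rw [mem_pvHeapPush]
    constructor
    · rintro (heq | hin)
      · have he1 : e = endOf events k := congrArg Prod.fst heq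
        have he2 : i = k := congrArg Prod.snd heq
        refine ⟨by omega, he1.trans (by rw [he2]), ?_⟩
        rw [he2]
        have h0 : k + 1 - (k + 1) = 0 := by omega
        rw [h0]
        rfl
      · rcases (pmem _).mp hin with ⟨hin2, hnl⟩
        rcases (hmem e i).mp hin2 with ⟨hik, hei, hscan⟩
        refine ⟨by omega, hei, ?_⟩
        have hr : List.range' (i + 1) (k + 1 - (i + 1)) =
            List.range' (i + 1) (k - (i + 1)) ++ [k] := by
          have h1 : k + 1 - (i + 1) = (k - (i + 1)) + 1 := by omega
          rw [h1, List.range'_1_concat]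
          congr 2
          omega
        rw [hr, pvScan_append, hscan]
        simp only [pvScan]
        have hnl2 : ¬ endOf events i < (events.getD k (0,0,0)).1 := by
          intro hcc
          apply hnl
          show e < startOf events k
          rw [hei]
          exact hcc
        rw [if_neg hnl2]
    · rintro ⟨hik1, hei, hscan⟩
      by_cases hik : i < k
      · right
        have hr : List.range' (i + 1) (k + 1 - (i + 1)) =
            List.range' (i + 1) (k - (i + 1)) ++ [k] := by
          have h1 : k + 1 - (i + 1) = (k - (i + 1)) + 1 := by omega
          rw [h1, List.range'_1_concat]
          congr 2
          omega
        rw [hr, pvScan_append] at hscan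
        cases hs : pvScan events (endOf events i) (List.range' (i + 1) (k - (i + 1))) with
        | some j => rw [hs] at hscan; simp at hscan
        | none =>
          rw [hs] at hscan
          simp only [pvScan] at hscan
          have hnl : ¬ endOf events i < (events.getD k (0,0,0)).1 := by
            intro hcc
            rw [if_pos hcc] at hscan
            simp at hscan
          refine (pmem _).mpr ⟨(hmem e i).mpr ⟨hik, hei, hs⟩, ?_⟩
          rw [hei]
          exact fun hcc => hnl hcc
      · left
        have hik2 : i = k := by omega
        subst hik2
        rw [hei]

theorem pvInv_zero (events : List (Int × Int × Int)) :
    pvInv events 0 (List.replicate events.length (Int.ofNat events.length), []) := by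
  refine ⟨by simp, ?_, by simp, by simp, by simp⟩
  intro i
  have : valAt events 0 i = Int.ofNat events.length := by
    unfold valAt
    have : 0 - (i + 1) = 0 := by omega
    rw [this]
    rfl
  rw [this]
  by_cases h : i < events.length
  · rw [List.getD_eq_getElem?_getD]
    simp [List.getElem?_replicate, h]
  · rw [List.getD_eq_getElem?_getD, List.getElem?_eq_none (by simpa using not_lt.mp h)]
    rfl

theorem pvInv_foldl (events : List (Int × Int × Int)) :
    ∀ k, k ≤ events.length →
    pvInv events k ((List.range k).foldl (pvStep events)
      (List.replicate events.length (Int.ofNat events.length), [])) := by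
  intro k
  induction k with
  | zero => intro _; simpa using pvInv_zero events
  | succ m ih =>
    intro hm
    rw [List.range_succ, List.foldl_append]
    simpa using pvStep_inv events m (by omega) _ (ih (by omega))

-- ===== VERDICT (by name: the statement is the Claim_ definition above) =====
theorem buildNextEvents_spec : Claim_equal_buildNextEvents := by
  intro events _
  unfold Spec_buildNextEvents buildNextEvents
  have hinv := pvInv_foldl events events.length le_rfl
  rcases hinv with ⟨hlen, hval, -, -, -⟩
  apply List.ext_getElem
  · rw [hlen]
    simp [buildNextEvents_alt]
  · intro i h1 h2
    have hi : i < events.length := hlen ▸ h1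
    have hv := hval i
    rw [List.getD_eq_getElem?_getD, List.getElem?_eq_getElem h1] at hv
    simp only [Option.getD_some] at hv
    rw [hv]
    simp only [buildNextEvents_alt, List.getElem_map, List.getElem_range]
    rfl
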